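-- pv_equiv track=rewrite | github.com/shalva231/G.O.A._projects-group_11 | day(30-40+1)/day_36/classwork/codewars/Data_Reverse.py | data_reverse
-- ===== SOURCE A (Python) =====
-- def data_reverse(data):
--     segments = []
--     for i in range(0, len(data), 8):
--         segment = data[i:i+8]
--         segments.append(segment)
--
--     segments.reverse()
--
--     reversed_data = []
--     for segment in segments:
--         for bit in segment:
--             reversed_data.append(bit)
--
--     return reversed_data
-- ===== SOURCE B (Python) =====
-- def data_reverse(data):
--     if not data:
--         return []
--     return data_reverse(data[8:]) + data[:8]
-- ===== Notes on version B (the rewrite author's own statement) =====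
-- stated objective: simpler
-- what changed: Replaces A's three staged passes (collect 8-element segments, reverse the segment list, flatten with a nested loop) by a two-line structural recursion: recurse on data[8:] and append the first block data[:8] after the recursive result.
import Mathlib
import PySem

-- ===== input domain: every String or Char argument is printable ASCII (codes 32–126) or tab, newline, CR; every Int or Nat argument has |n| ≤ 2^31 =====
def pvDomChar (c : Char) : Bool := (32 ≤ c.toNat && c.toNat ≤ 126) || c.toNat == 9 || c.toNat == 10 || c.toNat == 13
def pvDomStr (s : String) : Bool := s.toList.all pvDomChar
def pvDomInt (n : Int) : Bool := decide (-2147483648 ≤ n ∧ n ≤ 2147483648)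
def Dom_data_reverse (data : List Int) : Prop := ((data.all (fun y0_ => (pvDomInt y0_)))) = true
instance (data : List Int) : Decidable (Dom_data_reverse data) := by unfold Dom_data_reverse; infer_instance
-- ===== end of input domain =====

-- B replaces A's three staged passes (collect segments / reverse the segment list /
-- flatten with a nested loop) by a direct structural recursion on the 8-element head
-- block: data_reverse(data) = data_reverse(data[8:]) + data[:8] (objective: simpler).

-- ===== PORT A =====
def data_reverse (data : List Int) : List Int :=
  let segments : List (List Int) :=
    (PySem.List.pyRange 0 (data.length : Int) 8).foldl
      (fun segments i => segments ++ [PySem.List.slice data (some i) (some (i + 8))]) []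
  let segments2 := segments.reverse
  segments2.foldl (fun reversed_data segment =>
    segment.foldl (fun reversed_data bit => reversed_data ++ [bit]) reversed_data) []

-- ===== PORT B =====
def data_reverse_alt (data : List Int) : List Int :=
  if data = [] then []
  else data_reverse_alt (PySem.List.slice data (some 8) none) ++
       PySem.List.slice data none (some 8)
termination_by data.length
decreasing_by
  have hs : PySem.List.slice data (some 8) none = data.drop 8 :=
    PySem.List.slice_from data (by norm_num)
  rw [hs]
  have := List.length_pos_iff.mpr (by assumption : data ≠ [])
  simp only [List.length_drop]
  omega

-- ===== PRECONDITION & SPEC =====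
def Spec_data_reverse (data : List Int) (out : List Int) : Prop := out = data_reverse_alt data
instance (data : List Int) (out : List Int) : Decidable (Spec_data_reverse data out) := by unfold Spec_data_reverse; infer_instance

-- ===== CLAIM (what is proved, stated in full; the proofs are below) =====
def Claim_equal_data_reverse : Prop := ∀ (data : List Int), Dom_data_reverse data → Spec_data_reverse data (data_reverse data)

-- ===== LEMMAS AND PROOFS =====

-- The common backbone: the list of 8-element blocks of `l`, in order.
def pvChunks (l : List Int) : List (List Int) :=
  if l = [] then [] else l.take 8 :: pvChunks (l.drop 8)
termination_by l.length
decreasing_by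
  have := List.length_pos_iff.mpr (by assumption : l ≠ [])
  simp only [List.length_drop]; omega

-- B computes flatten (reverse (pvChunks l)); strong induction on length via a fuel bound.
theorem pv_alt_aux (n : Nat) : ∀ l : List Int, l.length ≤ n →
    data_reverse_alt l = ((pvChunks l).reverse).flatten := by
  induction n with
  | zero =>
      intro l hl
      have h0 : l = [] := by cases l <;> simp_all
      subst h0
      rw [data_reverse_alt, pvChunks]; rfl
  | succ n ih =>
      intro l hl
      by_cases h : l = []
      · subst h; rw [data_reverse_alt, pvChunks]; rfl
      · rw [data_reverse_alt, if_neg h, pvChunks, if_neg h,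
            PySem.List.slice_from l (by norm_num), PySem.List.slice_to l (by norm_num)]
        have hlen : (l.drop (Int.toNat 8)).length ≤ n := by
          have := List.length_pos_iff.mpr h
          simp only [List.length_drop]; omega
        rw [ih _ hlen]
        norm_num
        simp

theorem pv_alt_eq (l : List Int) : data_reverse_alt l = ((pvChunks l).reverse).flatten :=
  pv_alt_aux l.length l le_rfl

-- Nat-indexed form of A's first pass: the k-th block is (l.drop (8k)).take 8.
theorem pv_key_aux (n : Nat) : ∀ (m : Nat) (l : List Int), l.length ≤ n → m = (l.length + 7) / 8 →
    (List.range m).map (fun k => (l.drop (8 * k)).take 8) = pvChunks l := by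
  induction n with
  | zero =>
      intro m l hl hm
      have h0 : l = [] := by cases l <;> simp_all
      subst h0
      simp at hm; subst hm
      rw [pvChunks]; simp
  | succ n ih =>
      intro m l hl hm
      by_cases h : l = []
      · subst h; simp at hm; subst hm; rw [pvChunks]; simp
      · have hlp : 0 < l.length := List.length_pos_iff.mpr h
        rw [pvChunks, if_neg h]
        have hstep : m = ((l.drop 8).length + 7) / 8 + 1 := by
          simp only [List.length_drop]; omega
        rw [hstep, List.range_succ_eq_map, List.map_cons, List.map_map]
        refine congrArg₂ _ (by simp) ?_
        have hlen : (l.drop 8).length ≤ n := by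
          simp only [List.length_drop]; omega
        rw [← ih (((l.drop 8).length + 7) / 8) (l.drop 8) hlen rfl]
        apply List.map_congr_left
        intro k _
        simp only [Function.comp_apply, Nat.succ_eq_add_one]
        have h8 : 8 * (k + 1) = 8 + 8 * k := by ring
        rw [List.drop_drop, h8]

theorem pv_key (m : Nat) (l : List Int) (hm : m = (l.length + 7) / 8) :
    (List.range m).map (fun k => (l.drop (8 * k)).take 8) = pvChunks l :=
  pv_key_aux l.length m l le_rfl hm

-- A's index list of block starts, mapped to slices, is exactly pvChunks l.
theorem pv_map_chunks (l : List Int) :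
    (PySem.List.pyRange 0 (l.length : Int) 8).map
        (fun i => PySem.List.slice l (some i) (some (i + 8))) = pvChunks l := by
  rw [PySem.List.pyRange_of_pos 0 (l.length : Int) (by norm_num), List.map_map]
  by_cases h0 : l = []
  · subst h0; rw [pvChunks]; simp
  · have hlp : 0 < l.length := List.length_pos_iff.mpr h0
    rw [if_pos (by exact_mod_cast hlp)]
    have hfun : ((fun i => PySem.List.slice l (some i) (some (i + 8))) ∘
        (fun k : Nat => (0 : Int) + 8 * (k : Int)))
        = fun k : Nat => (l.drop (8 * k)).take 8 := by
      funext k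
      simp only [Function.comp]
      have h1 : ((0 : Int) + 8 * (k : Int)) = ((8 * k : Nat) : Int) := by push_cast; ring
      have h2 : ((0 : Int) + 8 * (k : Int) + 8) = ((8 * k : Nat) : Int) + ((8 : Nat) : Int) := by
        push_cast; ring
      rw [h1]
      have h3 : ((8 * k : Nat) : Int) + 8 = ((8 * k : Nat) : Int) + ((8 : Nat) : Int) := by
        norm_num
      rw [h3, PySem.List.slice_natCast_add]
    rw [hfun]
    apply pv_key
    omega

-- A computes flatten (reverse (pvChunks l)) too.
theorem pv_a_eq (l : List Int) : data_reverse l = ((pvChunks l).reverse).flatten := by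
  unfold data_reverse
  simp only [PySem.List.foldl_append_singleton_eq_map, List.nil_append]
  rw [pv_map_chunks]
  simp

-- ===== VERDICT (by name: the statement is the Claim_ definition above) =====
theorem data_reverse_spec : Claim_equal_data_reverse := by
  intro data _
  unfold Spec_data_reverse
  rw [pv_a_eq, pv_alt_eq]
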